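-- pv_equiv track=rewrite | github.com/LilMako17/AoC2023 | Day11.py | getDistance_taxicab
-- ===== SOURCE A (Python) =====
-- def getDistance_taxicab(pointA, pointB, lenghA, lengthB, rowssWithNoGalaxies, columnssWithNoGalaxies, expansion):
--     output = abs(pointB[1] - pointA[1]) + abs(pointB[0] - pointA[0])
--     rowIntercept = 0
--     columnIntercept = 0
--     for i in rowssWithNoGalaxies:
--         if (pointA[0] < i < pointB[0]) or (pointB[0] < i < pointA[0]):
--             rowIntercept += 1
--     for j in columnssWithNoGalaxies:
--         if (pointA[1] < j < pointB[1]) or (pointB[1] < j < pointA[1]):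
--             columnIntercept += 1
--
--     return output + (rowIntercept + columnIntercept) * (expansion - 1)
-- ===== SOURCE B (Python) =====
-- def _count_less(s, x, inclusive):
--     # number of elements of sorted list s that are < x (or <= x when inclusive),
--     # by binary search
--     lo, hi = 0, len(s)
--     while lo < hi:
--         mid = (lo + hi) // 2
--         if s[mid] < x or (inclusive and s[mid] == x):
--             lo = mid + 1
--         else:
--             hi = mid
--     return lo
--
--
-- def _crossings(vals, a, b):
--     # how many values of vals lie strictly between a and b
--     if a == b:
--         return 0
--     lo, hi = (a, b) if a < b else (b, a)
--     s = sorted(vals)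
--     return _count_less(s, hi, False) - _count_less(s, lo, True)
--
--
-- def getDistance_taxicab(pointA, pointB, lenghA, lengthB, rowssWithNoGalaxies, columnssWithNoGalaxies, expansion):
--     base = abs(pointB[1] - pointA[1]) + abs(pointB[0] - pointA[0])
--     crossed = (_crossings(rowssWithNoGalaxies, pointA[0], pointB[0])
--                + _crossings(columnssWithNoGalaxies, pointA[1], pointB[1]))
--     return base + crossed * (expansion - 1)
-- ===== Notes on version B (the rewrite author's own statement) =====
-- stated objective: alternative
-- what changed: B replaces A's two linear counting loops by sorting each empty-line list and counting the strictly-between elements as a difference of two hand-written binary searches (bisect_left(hi) - bisect_right(lo)).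
import Mathlib
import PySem

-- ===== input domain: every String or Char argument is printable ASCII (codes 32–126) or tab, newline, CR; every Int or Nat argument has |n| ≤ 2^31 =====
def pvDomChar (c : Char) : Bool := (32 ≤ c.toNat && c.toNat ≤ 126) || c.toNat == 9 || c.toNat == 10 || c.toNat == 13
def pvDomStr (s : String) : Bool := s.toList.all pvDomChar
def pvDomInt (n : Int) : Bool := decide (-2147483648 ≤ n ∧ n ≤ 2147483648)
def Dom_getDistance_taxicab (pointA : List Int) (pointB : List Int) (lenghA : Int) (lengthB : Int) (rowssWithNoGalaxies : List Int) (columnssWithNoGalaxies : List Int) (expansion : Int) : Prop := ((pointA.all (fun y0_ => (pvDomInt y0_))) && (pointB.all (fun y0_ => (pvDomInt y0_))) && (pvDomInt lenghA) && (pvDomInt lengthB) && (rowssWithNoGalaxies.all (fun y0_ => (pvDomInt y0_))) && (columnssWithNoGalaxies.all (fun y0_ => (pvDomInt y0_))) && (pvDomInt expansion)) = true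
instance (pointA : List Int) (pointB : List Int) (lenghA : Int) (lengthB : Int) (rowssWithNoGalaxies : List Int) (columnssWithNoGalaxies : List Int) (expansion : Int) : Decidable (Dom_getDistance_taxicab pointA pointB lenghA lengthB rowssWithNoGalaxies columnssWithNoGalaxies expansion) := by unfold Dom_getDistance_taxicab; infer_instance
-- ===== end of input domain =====

-- B counts the empty rows/columns strictly between the two coordinates by sorting once and
-- subtracting two binary searches, instead of A's linear scans (objective: alternative).
-- Pre_ excludes only inputs where both Pythons raise IndexError (a point with fewer than 2 coordinates).


-- ===== PORT A =====
-- xs[0]/xs[1]: index literals are nonnegative and in range by Pre_, so List.getD is exact here.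
def getDistance_taxicab (pointA : List Int) (pointB : List Int) (lenghA : Int) (lengthB : Int) (rowssWithNoGalaxies : List Int) (columnssWithNoGalaxies : List Int) (expansion : Int) : Int :=
  -- output, then the two counting loops (rowIntercept, columnIntercept), then the return expression
  (|pointB.getD 1 0 - pointA.getD 1 0| + |pointB.getD 0 0 - pointA.getD 0 0|)
  + (rowssWithNoGalaxies.foldl (fun acc i =>
       if (pointA.getD 0 0 < i ∧ i < pointB.getD 0 0) ∨ (pointB.getD 0 0 < i ∧ i < pointA.getD 0 0)
       then acc + 1 else acc) (0 : Int)
     + columnssWithNoGalaxies.foldl (fun acc j =>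
       if (pointA.getD 1 0 < j ∧ j < pointB.getD 1 0) ∨ (pointB.getD 1 0 < j ∧ j < pointA.getD 1 0)
       then acc + 1 else acc) (0 : Int)) * (expansion - 1)

-- ===== PORT B =====
-- The while-loop of _count_less(s, x, inclusive), transcribed with a structural fuel that
-- bounds the remaining interval (fuel ≥ hi - lo always holds on every call chain from
-- pvCountLess, so the fuel never runs out before lo = hi); s[mid] is in range
-- (lo ≤ mid < hi ≤ len s), so getD is exact.
def pvCountLessAux (s : List Int) (x : Int) (inclusive : Bool) : Nat → Nat → Nat → Nat
  | 0, lo, _ => lo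
  | fuel + 1, lo, hi =>
    if lo < hi then
      let mid := (lo + hi) / 2
      if s.getD mid 0 < x ∨ (inclusive = true ∧ s.getD mid 0 = x) then
        pvCountLessAux s x inclusive fuel (mid + 1) hi
      else
        pvCountLessAux s x inclusive fuel lo mid
    else lo

-- _count_less(s, x, inclusive): lo, hi = 0, len(s); run the loop.
def pvCountLess (s : List Int) (x : Int) (inclusive : Bool) : Nat :=
  pvCountLessAux s x inclusive s.length 0 s.length

-- _crossings(vals, a, b)
def pvCrossings (vals : List Int) (a b : Int) : Int :=
  if a = b then 0
  else
    let lo := if a < b then a else b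
    let hi := if a < b then b else a
    let s := PySem.List.sorted vals (fun x => x) false
    (pvCountLess s hi false : Int) - (pvCountLess s lo true : Int)

def getDistance_taxicab_alt (pointA : List Int) (pointB : List Int) (lenghA : Int) (lengthB : Int) (rowssWithNoGalaxies : List Int) (columnssWithNoGalaxies : List Int) (expansion : Int) : Int :=
  -- base + crossed * (expansion - 1)
  (|pointB.getD 1 0 - pointA.getD 1 0| + |pointB.getD 0 0 - pointA.getD 0 0|)
  + (pvCrossings rowssWithNoGalaxies (pointA.getD 0 0) (pointB.getD 0 0)
     + pvCrossings columnssWithNoGalaxies (pointA.getD 1 0) (pointB.getD 1 0)) * (expansion - 1)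

-- ===== PRECONDITION & SPEC =====
-- Pre_ excludes exactly the inputs where Python A raises IndexError: a point list with fewer than two entries.
def Pre_getDistance_taxicab (pointA : List Int) (pointB : List Int) (lenghA : Int) (lengthB : Int) (rowssWithNoGalaxies : List Int) (columnssWithNoGalaxies : List Int) (expansion : Int) : Prop :=
  2 ≤ pointA.length ∧ 2 ≤ pointB.length
instance (pointA : List Int) (pointB : List Int) (lenghA : Int) (lengthB : Int) (rowssWithNoGalaxies : List Int) (columnssWithNoGalaxies : List Int) (expansion : Int) : Decidable (Pre_getDistance_taxicab pointA pointB lenghA lengthB rowssWithNoGalaxies columnssWithNoGalaxies expansion) := by unfold Pre_getDistance_taxicab; infer_instance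

def pvWitness_getDistance_taxicab : List Int × List Int × Int × Int × List Int × List Int × Int :=
  ([0, 0], [3, 4], 10, 10, [1, 2], [2], 2)

def Spec_getDistance_taxicab (pointA : List Int) (pointB : List Int) (lenghA : Int) (lengthB : Int) (rowssWithNoGalaxies : List Int) (columnssWithNoGalaxies : List Int) (expansion : Int) (out : Int) : Prop := out = getDistance_taxicab_alt pointA pointB lenghA lengthB rowssWithNoGalaxies columnssWithNoGalaxies expansion
instance (pointA : List Int) (pointB : List Int) (lenghA : Int) (lengthB : Int) (rowssWithNoGalaxies : List Int) (columnssWithNoGalaxies : List Int) (expansion : Int) (out : Int) : Decidable (Spec_getDistance_taxicab pointA pointB lenghA lengthB rowssWithNoGalaxies columnssWithNoGalaxies expansion out) := by unfold Spec_getDistance_taxicab; infer_instance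

-- ===== CLAIM (what is proved, stated in full; the proofs are below) =====
def Claim_equal_getDistance_taxicab : Prop := ∀ (pointA : List Int) (pointB : List Int) (lenghA : Int) (lengthB : Int) (rowssWithNoGalaxies : List Int) (columnssWithNoGalaxies : List Int) (expansion : Int), Dom_getDistance_taxicab pointA pointB lenghA lengthB rowssWithNoGalaxies columnssWithNoGalaxies expansion → Pre_getDistance_taxicab pointA pointB lenghA lengthB rowssWithNoGalaxies columnssWithNoGalaxies expansion → Spec_getDistance_taxicab pointA pointB lenghA lengthB rowssWithNoGalaxies columnssWithNoGalaxies expansion (getDistance_taxicab pointA pointB lenghA lengthB rowssWithNoGalaxies columnssWithNoGalaxies expansion)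

-- ===== LEMMAS AND PROOFS =====

-- A's counting loop is countP.
theorem pvFold_countP (xs : List Int) (p : Int → Prop) [DecidablePred p] (acc : Int) :
    xs.foldl (fun acc i => if p i then acc + 1 else acc) acc
      = acc + (xs.countP (fun i => decide (p i)) : Int) := by
  induction xs generalizing acc with
  | nil => simp
  | cons a t ih =>
      simp only [List.foldl_cons, List.countP_cons, ih]
      by_cases h : p a <;> simp [h] <;> push_cast <;> ring

-- countP from index-wise information: the first m elements satisfy p, the rest do not.
theorem pvCountP_of_indices (p : Int → Bool) :
    ∀ (s : List Int) (m : Nat), m ≤ s.length →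
      (∀ k, k < m → p (s.getD k 0) = true) →
      (∀ k, m ≤ k → k < s.length → p (s.getD k 0) = false) →
      s.countP p = m := by
  intro s
  induction s with
  | nil => intro m hm _ _; simp only [List.countP_nil, List.length_nil] at hm ⊢; omega
  | cons a t ih =>
      intro m hm h1 h2
      cases m with
      | zero =>
          have ha : p a = false := by simpa using h2 0 (Nat.zero_le _) (by simp)
          have ht : t.countP p = 0 := by
            refine ih 0 (Nat.zero_le _) (by intro k hk; omega) ?_
            intro k _ hk
            simpa using h2 (k + 1) (Nat.zero_le _) (by simpa using Nat.succ_lt_succ hk)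
          simp [List.countP_cons, ha, ht]
      | succ m' =>
          have ha : p a = true := by simpa using h1 0 (Nat.succ_pos _)
          have ht : t.countP p = m' := by
            refine ih m' (by simpa using Nat.lt_succ_iff.mp (Nat.lt_of_lt_of_le (Nat.lt_succ_self _) (by simpa using hm))) ?_ ?_
            · intro k hk
              simpa using h1 (k + 1) (Nat.succ_lt_succ hk)
            · intro k hk hk'
              simpa using h2 (k + 1) (Nat.succ_le_succ hk) (by simpa using Nat.succ_lt_succ hk')
          simp [List.countP_cons, ha, ht]

-- The search predicate is downward closed on a sorted list.
theorem pvPred_mono (x : Int) (inc : Bool) {u v : Int} (huv : u ≤ v)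
    (hv : v < x ∨ (inc = true ∧ v = x)) : u < x ∨ (inc = true ∧ u = x) := by
  rcases hv with hv | ⟨hi, hv⟩
  · exact Or.inl (lt_of_le_of_lt huv hv)
  · rcases lt_or_eq_of_le (hv ▸ huv) with h | h
    · exact Or.inl h
    · exact Or.inr ⟨hi, h⟩

-- Correctness of the binary-search loop (fuel-indexed).
theorem pvCountLessAux_eq (s : List Int) (x : Int) (inc : Bool)
    (hs : s.Pairwise (· ≤ ·)) :
    ∀ (n lo hi : Nat), hi - lo ≤ n → lo ≤ hi → hi ≤ s.length →
      (∀ k, k < lo → (decide (s.getD k 0 < x ∨ (inc = true ∧ s.getD k 0 = x))) = true) →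
      (∀ k, hi ≤ k → k < s.length → (decide (s.getD k 0 < x ∨ (inc = true ∧ s.getD k 0 = x))) = false) →
      pvCountLessAux s x inc n lo hi
        = s.countP (fun v => decide (v < x ∨ (inc = true ∧ v = x))) := by
  have hget : ∀ (i j : Nat), i ≤ j → j < s.length → s.getD i 0 ≤ s.getD j 0 := by
    intro i j hij hj
    rcases Nat.eq_or_lt_of_le hij with rfl | hlt
    · exact le_refl _
    · have hi : i < s.length := Nat.lt_trans hlt hj
      rw [List.getD_eq_getElem _ _ hi, List.getD_eq_getElem _ _ hj]
      exact List.pairwise_iff_getElem.mp hs i j hi hj hlt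
  intro n
  induction n with
  | zero =>
      intro lo hi hn hlohi hhi h1 h2
      have : lo = hi := by omega
      subst this
      exact (pvCountP_of_indices _ s lo hhi h1 (fun k hk hk' => h2 k hk hk')).symm
  | succ n ih =>
      intro lo hi hn hlohi hhi h1 h2
      by_cases hlt : lo < hi
      · rw [pvCountLessAux]
        simp only [hlt, if_true]
        set mid := (lo + hi) / 2 with hmid
        have hmlo : lo ≤ mid := by omega
        have hmhi : mid < hi := by omega
        have hmlen : mid < s.length := by omega
        by_cases hp : s.getD mid 0 < x ∨ (inc = true ∧ s.getD mid 0 = x)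
        · simp only [hp, if_true]
          refine ih (mid + 1) hi (by omega) (by omega) hhi ?_ h2
          intro k hk
          exact decide_eq_true (pvPred_mono x inc (hget k mid (by omega) hmlen) hp)
        · simp only [hp, if_false]
          refine ih lo mid (by omega) (by omega) (by omega) h1 ?_
          intro k hk hk'
          refine decide_eq_false ?_
          intro hpk
          exact hp (pvPred_mono x inc (hget mid k hk hk') hpk)
      · have : lo = hi := by omega
        subst this
        rw [pvCountLessAux]
        simp only [lt_irrefl, if_false]
        exact (pvCountP_of_indices _ s lo hhi h1 (fun k hk hk' => h2 k hk hk')).symm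

-- Correctness of _count_less.
theorem pvCountLess_eq (s : List Int) (x : Int) (inc : Bool)
    (hs : s.Pairwise (· ≤ ·))
    (h2 : ∀ k, s.length ≤ k → k < s.length →
      (decide (s.getD k 0 < x ∨ (inc = true ∧ s.getD k 0 = x))) = false) :
    pvCountLess s x inc = s.countP (fun v => decide (v < x ∨ (inc = true ∧ v = x))) :=
  pvCountLessAux_eq s x inc hs s.length 0 s.length (by omega) (Nat.zero_le _) (le_refl _)
    (by intro k hk; omega) h2

-- countP splits at the lower bound.
theorem pvCountP_split (vals : List Int) (lo hi : Int) (h : lo < hi) :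
    vals.countP (fun v => decide (v < hi))
      = vals.countP (fun v => decide (lo < v ∧ v < hi))
        + vals.countP (fun v => decide (v ≤ lo)) := by
  induction vals with
  | nil => simp
  | cons a t ih =>
      simp only [List.countP_cons, ih]
      by_cases h1 : a < hi <;> by_cases h2 : lo < a <;> by_cases h3 : a ≤ lo <;>
        first
          | omega
          | simp [h1, h2, h3] <;> omega

-- pvCrossings computes exactly A's count.
theorem pvCrossings_eq (vals : List Int) (a b : Int) :
    pvCrossings vals a b
      = (vals.countP (fun i => decide ((a < i ∧ i < b) ∨ (b < i ∧ i < a))) : Int) := by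
  by_cases hab : a = b
  · subst hab
    rw [pvCrossings, if_pos rfl]
    have h0 : vals.countP (fun i => decide ((a < i ∧ i < a) ∨ (a < i ∧ i < a))) = 0 := by
      apply List.countP_eq_zero.mpr
      intro v _
      simp only [decide_eq_true_eq]
      omega
    rw [h0]
    rfl
  · rw [pvCrossings]
    simp only [hab, if_false]
    set lo := if a < b then a else b with hlo
    set hi := if a < b then b else a with hhi
    have hlohi : lo < hi := by
      by_cases h : a < b <;> simp [hlo, hhi, h] <;> omega
    set s := PySem.List.sorted vals (fun x => x) false with hsdef
    have hsp : s.Pairwise (· ≤ ·) := by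
      simpa using PySem.List.sorted_pairwise (xs := vals) (key := fun x => x)
    have hperm : s.Perm vals := PySem.List.sorted_perm vals (fun x => x) false
    have hF : pvCountLess s hi false
        = s.countP (fun v => decide (v < hi ∨ (false = true ∧ v = hi))) :=
      pvCountLess_eq s hi false hsp (by intro k hk hk'; omega)
    have hT : pvCountLess s lo true
        = s.countP (fun v => decide (v < lo ∨ (true = true ∧ v = lo))) :=
      pvCountLess_eq s lo true hsp (by intro k hk hk'; omega)
    rw [hF, hT]
    have eF : s.countP (fun v => decide (v < hi ∨ (false = true ∧ v = hi)))
        = vals.countP (fun v => decide (v < hi)) := by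
      rw [hperm.countP_eq]
      apply List.countP_congr
      intro v _
      simp
    have eT : s.countP (fun v => decide (v < lo ∨ (true = true ∧ v = lo)))
        = vals.countP (fun v => decide (v ≤ lo)) := by
      rw [hperm.countP_eq]
      apply List.countP_congr
      intro v _
      simp only [true_and, decide_eq_true_eq]
      omega
    rw [eF, eT]
    have eB : vals.countP (fun i => decide ((a < i ∧ i < b) ∨ (b < i ∧ i < a)))
        = vals.countP (fun v => decide (lo < v ∧ v < hi)) := by
      apply List.countP_congr
      intro v _
      simp only [decide_eq_true_eq]
      by_cases h : a < b <;> simp [hlo, hhi, h] <;> omega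
    rw [eB, pvCountP_split vals lo hi hlohi]
    push_cast
    ring

-- A's loop over one list equals B's sort-and-binary-search count.
theorem pvLoop_eq (vals : List Int) (a b : Int) :
    vals.foldl (fun acc i =>
        if (a < i ∧ i < b) ∨ (b < i ∧ i < a) then acc + 1 else acc) (0 : Int)
      = pvCrossings vals a b := by
  rw [pvFold_countP vals (fun i => (a < i ∧ i < b) ∨ (b < i ∧ i < a)) 0, pvCrossings_eq]
  ring

-- ===== VERDICT (by name: the statement is the Claim_ definition above) =====
theorem getDistance_taxicab_spec : Claim_equal_getDistance_taxicab := by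
  intro pointA pointB lenghA lengthB rows cols expansion _ _
  unfold Spec_getDistance_taxicab getDistance_taxicab getDistance_taxicab_alt
  rw [pvLoop_eq, pvLoop_eq]
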